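-- pv_equiv track=rewrite | github.com/A4444z/SecretPPI | src/data/extract_interface.py | contact_based_expansion
-- ===== SOURCE A (Python) =====
-- from typing import Dict, List, Tuple, Set, Optional
--
-- def contact_based_expansion(
--     initial_residues: Set[Tuple[str, int, str, str]],
--     adjacency: Dict[Tuple[str, int, str, str], Set[Tuple[str, int, str, str]]],
--     max_depth: int = 2,
-- ) -> Set[Tuple[str, int, str, str]]:
--     """沿着链内邻接关系，从初始界面残基开始进行固定步数的迭代扩展。"""
--     expanded: Set[Tuple[str, int, str, str]] = set(initial_residues)
--     current_frontier: Set[Tuple[str, int, str, str]] = set(initial_residues)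
--
--     for _ in range(max_depth):
--         next_frontier: Set[Tuple[str, int, str, str]] = set()
--         for res in current_frontier:
--             neighbors = adjacency.get(res, set())
--             for nbr in neighbors:
--                 if nbr not in expanded:
--                     expanded.add(nbr)
--                     next_frontier.add(nbr)
--
--         current_frontier = next_frontier
--         if not current_frontier:
--             break
--
--     return expanded
-- ===== SOURCE B (Python) =====
-- def contact_based_expansion(initial_residues, adjacency, max_depth=2):
--     expanded = set(initial_residues)
--     queue = [(res, 0) for res in expanded]
--     i = 0
--     while i < len(queue):
--         res, d = queue[i]
--         i += 1
--         if d < max_depth: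
--             for nbr in adjacency.get(res, ()):
--                 if nbr not in expanded:
--                     expanded.add(nbr)
--                     queue.append((nbr, d + 1))
--     return expanded
-- ===== Notes on version B (the rewrite author's own statement) =====
-- stated objective: alternative
-- what changed: Replaced the level-synchronous frontier-set rounds (outer loop over depths, per-round next_frontier set) with a single flat FIFO-queue BFS that carries a per-node depth and marks nodes visited at enqueue time.
import Mathlib
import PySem

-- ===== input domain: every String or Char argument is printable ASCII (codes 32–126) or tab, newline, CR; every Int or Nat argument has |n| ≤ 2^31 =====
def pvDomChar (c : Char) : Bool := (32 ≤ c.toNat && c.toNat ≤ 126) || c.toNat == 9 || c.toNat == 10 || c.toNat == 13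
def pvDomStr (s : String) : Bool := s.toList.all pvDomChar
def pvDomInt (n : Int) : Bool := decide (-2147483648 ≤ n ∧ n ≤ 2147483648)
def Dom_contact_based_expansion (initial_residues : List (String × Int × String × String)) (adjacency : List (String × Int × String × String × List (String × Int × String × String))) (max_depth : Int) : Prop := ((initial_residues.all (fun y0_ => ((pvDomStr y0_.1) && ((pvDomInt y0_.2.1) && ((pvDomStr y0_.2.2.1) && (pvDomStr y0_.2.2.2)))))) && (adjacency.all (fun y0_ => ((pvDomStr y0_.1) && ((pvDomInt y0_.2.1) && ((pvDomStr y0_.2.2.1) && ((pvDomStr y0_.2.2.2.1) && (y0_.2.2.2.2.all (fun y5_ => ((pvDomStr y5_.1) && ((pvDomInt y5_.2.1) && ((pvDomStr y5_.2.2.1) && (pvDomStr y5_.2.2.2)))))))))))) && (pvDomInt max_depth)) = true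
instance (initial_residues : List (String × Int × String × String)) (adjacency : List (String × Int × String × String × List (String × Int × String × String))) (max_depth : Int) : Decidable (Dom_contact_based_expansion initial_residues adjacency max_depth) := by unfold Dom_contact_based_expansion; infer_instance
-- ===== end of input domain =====

-- ===== PORT A =====
-- One honest line: B replaces A's level-synchronous frontier-set rounds by a single flat
-- FIFO-queue BFS carrying per-node depths (alternative decomposition; same result set).
-- (Source B's queue-with-read-index i is ported as the pending suffix queue[i:], the deque view of the same loop.)

-- shared helper: Python's adjacency.get(res, default) — first matching key of the association list
def cbeAdjGet (adjacency : List (String × Int × String × String × List (String × Int × String × String))) (res : String × Int × String × String) : List (String × Int × String × String) :=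
  match adjacency with
  | [] => []
  | (a, b, c, d, nbrs) :: rest => if (a, b, c, d) = res then nbrs else cbeAdjGet rest res

-- A's inner loop body: if nbr not in expanded: expanded.add(nbr); next_frontier.add(nbr)
def cbeStepA (st : PySem.Set (String × Int × String × String) × PySem.Set (String × Int × String × String)) (nbr : String × Int × String × String) : PySem.Set (String × Int × String × String) × PySem.Set (String × Int × String × String) :=
  if PySem.Set.contains st.1 nbr then st else (PySem.Set.add st.1 nbr, PySem.Set.add st.2 nbr)

-- one round of A: for res in current_frontier: for nbr in adjacency.get(res, set()): …
def cbeRound (adjacency : List (String × Int × String × String × List (String × Int × String × String))) (exp : PySem.Set (String × Int × String × String)) (frontier : List (String × Int × String × String)) : PySem.Set (String × Int × String × String) × PySem.Set (String × Int × String × String) :=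
  frontier.foldl (fun st res => (cbeAdjGet adjacency res).foldl cbeStepA st) (exp, PySem.Set.empty)

-- A's outer loop: for _ in range(max_depth): …; if not current_frontier: break
def cbeLoopA (adjacency : List (String × Int × String × String × List (String × Int × String × String))) : Nat → PySem.Set (String × Int × String × String) → List (String × Int × String × String) → PySem.Set (String × Int × String × String)
  | 0, exp, _ => exp
  | k+1, exp, fr =>
      let st := cbeRound adjacency exp fr
      if st.2 = [] then st.1 else cbeLoopA adjacency k st.1 st.2

def contact_based_expansion (initial_residues : List (String × Int × String × String)) (adjacency : List (String × Int × String × String × List (String × Int × String × String))) (max_depth : Int) : List (String × Int × String × String) :=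
  cbeLoopA adjacency max_depth.toNat (PySem.Set.ofList initial_residues) (PySem.Set.ofList initial_residues)

-- ===== PORT B =====
-- B's inner loop body: if nbr not in expanded: expanded.add(nbr); queue.append((nbr, d+1))
def cbeStepB (d : Nat) (st : PySem.Set (String × Int × String × String) × List ((String × Int × String × String) × Nat)) (nbr : String × Int × String × String) : PySem.Set (String × Int × String × String) × List ((String × Int × String × String) × Nat) :=
  if PySem.Set.contains st.1 nbr then st else (PySem.Set.add st.1 nbr, st.2 ++ [(nbr, d+1)])

-- termination helpers for the queue loop (each enqueue marks a fresh element of the adjacency's value pool as visited)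
def cbeUniv (adjacency : List (String × Int × String × String × List (String × Int × String × String))) : List (String × Int × String × String) :=
  adjacency.flatMap (fun e => e.2.2.2.2)

def cbeCount (adjacency : List (String × Int × String × String × List (String × Int × String × String))) (exp : PySem.Set (String × Int × String × String)) : Nat :=
  ((cbeUniv adjacency).filter (fun x => !(PySem.Set.contains exp x))).length

theorem cbeFilterAux {α : Type} [BEq α] [LawfulBEq α] (x : α) (p : α → Bool) : ∀ (l : List α), x ∈ l → p x = true → (l.filter (fun y => p y && !(y == x))).length < (l.filter p).length := by
  intro l hl hp
  induction l with
  | nil => cases hl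
  | cons a l ih =>
    by_cases hax : a = x
    · subst hax
      have hsub : List.Sublist (l.filter (fun y => p y && !(y == a))) (l.filter p) :=
        List.monotone_filter_right l (fun y hy => by
          simp only [Bool.and_eq_true] at hy; exact hy.1)
      have h1 : (a :: l).filter (fun y => p y && !(y == a)) = l.filter (fun y => p y && !(y == a)) := by
        simp
      have h2 : (a :: l).filter p = a :: l.filter p := by
        simp [hp]
      rw [h1, h2]
      have := hsub.length_le
      simp only [List.length_cons]
      omega
    · have hxl : x ∈ l := by cases hl with
        | head => exact absurd rfl hax
        | tail _ h => exact h
      have hne : (a == x) = false := beq_eq_false_iff_ne.mpr hax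
      have := ih hxl
      cases hpa : p a <;> simp [hne, hpa] <;> omega

theorem cbeAdjGet_subset (adjacency : List (String × Int × String × String × List (String × Int × String × String))) (res : String × Int × String × String) : ∀ x ∈ cbeAdjGet adjacency res, x ∈ cbeUniv adjacency := by
  induction adjacency with
  | nil => intro x hx; simp [cbeAdjGet] at hx
  | cons e rest ih =>
    intro x hx
    obtain ⟨a, b, c, dd, nbrs⟩ := e
    simp only [cbeAdjGet] at hx
    simp only [cbeUniv, List.flatMap_cons, List.mem_append]
    split at hx
    · exact Or.inl hx
    · exact Or.inr (by simpa [cbeUniv] using ih x hx)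

theorem cbeCount_append_lt (adjacency : List (String × Int × String × String × List (String × Int × String × String))) (exp : PySem.Set (String × Int × String × String)) (x : String × Int × String × String) (hmem : x ∈ cbeUniv adjacency) (hx : ¬ PySem.Set.contains exp x = true) : cbeCount adjacency (exp ++ [x]) < cbeCount adjacency exp := by
  unfold cbeCount
  have hcongr : ∀ y, (!(PySem.Set.contains (exp ++ [x]) y)) = ((!(PySem.Set.contains exp y)) && !(y == x)) := by
    intro y
    by_cases hyx : y = x
    · subst hyx
      simp [PySem.Set.contains_iff]
    · by_cases hye : y ∈ exp <;>
        simp [List.mem_append, hyx, hye]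
  have hrw : (cbeUniv adjacency).filter (fun y => !(PySem.Set.contains (exp ++ [x]) y)) = (cbeUniv adjacency).filter (fun y => (!(PySem.Set.contains exp y)) && !(y == x)) := by
    apply List.filter_congr
    intro y _
    exact hcongr y
  rw [hrw]
  refine cbeFilterAux x (fun y => !(PySem.Set.contains exp y)) (cbeUniv adjacency) hmem ?_
  rw [Bool.not_eq_true']
  exact eq_false_of_ne_true hx

theorem cbeFoldB_measure (adjacency : List (String × Int × String × String × List (String × Int × String × String))) (d : Nat) : ∀ (l : List (String × Int × String × String)), (∀ x ∈ l, x ∈ cbeUniv adjacency) → ∀ exp q, cbeCount adjacency (l.foldl (cbeStepB d) (exp, q)).1 + (l.foldl (cbeStepB d) (exp, q)).2.length ≤ cbeCount adjacency exp + q.length := by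
  intro l
  induction l with
  | nil => intro _ exp q; simp
  | cons a l ih =>
    intro hl exp q
    by_cases hc : PySem.Set.contains exp a = true
    · have hstep : cbeStepB d (exp, q) a = (exp, q) := by
        unfold cbeStepB; rw [if_pos hc]
      rw [List.foldl_cons, hstep]
      exact ih (fun x hx => hl x (List.mem_cons_of_mem a hx)) exp q
    · have hnm : a ∉ exp := fun h => hc ((PySem.Set.contains_iff exp a).mpr h)
      have hstep : cbeStepB d (exp, q) a = (exp ++ [a], q ++ [(a, d+1)]) := by
        unfold cbeStepB; rw [if_neg hc, PySem.Set.add_of_not_mem hnm]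
      rw [List.foldl_cons, hstep]
      have := ih (fun x hx => hl x (List.mem_cons_of_mem a hx)) (exp ++ [a]) (q ++ [(a, d+1)])
      have hlt := cbeCount_append_lt adjacency exp a (hl a (List.mem_cons_self ..)) hc
      simp only [List.length_append, List.length_cons, List.length_nil] at this ⊢
      omega

-- B's queue loop: while i < len(queue): res, d = queue[i]; i += 1; …  (pending suffix queue[i:])
def cbeBfs (adjacency : List (String × Int × String × String × List (String × Int × String × String))) (md : Int) (exp : PySem.Set (String × Int × String × String)) (queue : List ((String × Int × String × String) × Nat)) : PySem.Set (String × Int × String × String) :=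
  match queue with
  | [] => exp
  | (res, d) :: rest =>
      if (d : Int) < md then
        let st := (cbeAdjGet adjacency res).foldl (cbeStepB d) (exp, rest)
        cbeBfs adjacency md st.1 st.2
      else cbeBfs adjacency md exp rest
termination_by cbeCount adjacency exp + queue.length
decreasing_by
  · have h := cbeFoldB_measure adjacency d (cbeAdjGet adjacency res) (cbeAdjGet_subset adjacency res) exp rest
    simp only [List.length_cons]
    omega
  · simp only [List.length_cons]
    omega

def contact_based_expansion_alt (initial_residues : List (String × Int × String × String)) (adjacency : List (String × Int × String × String × List (String × Int × String × String))) (max_depth : Int) : List (String × Int × String × String) :=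
  cbeBfs adjacency max_depth (PySem.Set.ofList initial_residues) ((PySem.Set.ofList initial_residues).map (fun r => (r, 0)))

-- ===== PRECONDITION & SPEC =====
def Spec_contact_based_expansion (initial_residues : List (String × Int × String × String)) (adjacency : List (String × Int × String × String × List (String × Int × String × String))) (max_depth : Int) (out : List (String × Int × String × String)) : Prop := out = contact_based_expansion_alt initial_residues adjacency max_depth
instance (initial_residues : List (String × Int × String × String)) (adjacency : List (String × Int × String × String × List (String × Int × String × String))) (max_depth : Int) (out : List (String × Int × String × String)) : Decidable (Spec_contact_based_expansion initial_residues adjacency max_depth out) := by unfold Spec_contact_based_expansion; infer_instance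

-- ===== CLAIM (what is proved, stated in full; the proofs are below) =====
def Claim_equal_contact_based_expansion : Prop := ∀ (initial_residues : List (String × Int × String × String)) (adjacency : List (String × Int × String × String × List (String × Int × String × String))) (max_depth : Int), Dom_contact_based_expansion initial_residues adjacency max_depth → Spec_contact_based_expansion initial_residues adjacency max_depth (contact_based_expansion initial_residues adjacency max_depth)

-- ===== LEMMAS AND PROOFS =====

-- Inner bridge: on one node's neighbour list, A's (expanded, next_frontier) fold and B's
-- (expanded, queue) fold add the same fresh nodes Δ, A to next_frontier and B to the queue at depth d+1.
theorem cbeInner (d : Nat) : ∀ (l : List (String × Int × String × String)) (exp nx : PySem.Set (String × Int × String × String)) (q : List ((String × Int × String × String) × Nat)), (∀ x ∈ nx, PySem.Set.contains exp x) → ∃ Δ, l.foldl cbeStepA (exp, nx) = ((l.foldl (cbeStepB d) (exp, q)).1, nx ++ Δ) ∧ (l.foldl (cbeStepB d) (exp, q)).2 = q ++ Δ.map (fun r => (r, d+1)) ∧ (∀ x ∈ nx ++ Δ, PySem.Set.contains (l.foldl (cbeStepB d) (exp, q)).1 x) := by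
  intro l
  induction l with
  | nil =>
    intro exp nx q h
    exact ⟨[], by simp, by simp, by simpa using h⟩
  | cons a l ih =>
    intro exp nx q h
    by_cases hc : PySem.Set.contains exp a = true
    · have hA : cbeStepA (exp, nx) a = (exp, nx) := by unfold cbeStepA; rw [if_pos hc]
      have hB : cbeStepB d (exp, q) a = (exp, q) := by unfold cbeStepB; rw [if_pos hc]
      rw [List.foldl_cons, List.foldl_cons, hA, hB]
      exact ih exp nx q h
    · have hnmE : a ∉ exp := fun hm => hc ((PySem.Set.contains_iff exp a).mpr hm)
      have hnmN : a ∉ nx := fun hm => hc (h a hm)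
      have hA : cbeStepA (exp, nx) a = (exp ++ [a], nx ++ [a]) := by
        unfold cbeStepA
        rw [if_neg hc, PySem.Set.add_of_not_mem hnmE, PySem.Set.add_of_not_mem hnmN]
      have hB : cbeStepB d (exp, q) a = (exp ++ [a], q ++ [(a, d+1)]) := by
        unfold cbeStepB; rw [if_neg hc, PySem.Set.add_of_not_mem hnmE]
      rw [List.foldl_cons, List.foldl_cons, hA, hB]
      have h' : ∀ x ∈ nx ++ [a], PySem.Set.contains (exp ++ [a]) x := by
        intro x hx
        apply (PySem.Set.contains_iff _ _).mpr
        rcases List.mem_append.mp hx with hx | hx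
        · exact List.mem_append.mpr (Or.inl ((PySem.Set.contains_iff _ _).mp (h x hx)))
        · exact List.mem_append.mpr (Or.inr hx)
      obtain ⟨Δ, h1, h2, h3⟩ := ih (exp ++ [a]) (nx ++ [a]) (q ++ [(a, d + 1)]) h'
      refine ⟨a :: Δ, ?_, ?_, ?_⟩
      · rw [h1]; simp
      · rw [h2]; simp
      · intro x hx
        apply h3
        simp only [List.mem_append, List.mem_cons] at hx ⊢
        tauto

-- Level bridge: running B's queue through one whole level equals one round of A.
theorem cbeLevel (adjacency : List (String × Int × String × String × List (String × Int × String × String))) (md : Int) (d : Nat) (hd : (d : Int) < md) : ∀ (fr : List (String × Int × String × String)) (exp nx : PySem.Set (String × Int × String × String)), (∀ x ∈ nx, PySem.Set.contains exp x) → cbeBfs adjacency md exp (fr.map (fun r => (r, d)) ++ nx.map (fun r => (r, d+1))) = cbeBfs adjacency md (fr.foldl (fun st res => (cbeAdjGet adjacency res).foldl cbeStepA st) (exp, nx)).1 ((fr.foldl (fun st res => (cbeAdjGet adjacency res).foldl cbeStepA st) (exp, nx)).2.map (fun r => (r, d+1))) ∧ (∀ x ∈ (fr.foldl (fun st res =>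 (cbeAdjGet adjacency res).foldl cbeStepA st) (exp, nx)).2, PySem.Set.contains (fr.foldl (fun st res => (cbeAdjGet adjacency res).foldl cbeStepA st) (exp, nx)).1 x) := by
  intro fr
  induction fr with
  | nil =>
    intro exp nx h
    exact ⟨by simp, by simpa using h⟩
  | cons res fr ih =>
    intro exp nx h
    obtain ⟨Δ, h1, h2, h3⟩ := cbeInner d (cbeAdjGet adjacency res) exp nx
      (fr.map (fun r => (r, d)) ++ nx.map (fun r => (r, d + 1))) h
    have hq2 : ((cbeAdjGet adjacency res).foldl (cbeStepB d)
        (exp, fr.map (fun r => (r, d)) ++ nx.map (fun r => (r, d + 1)))).2 =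
        fr.map (fun r => (r, d)) ++ (nx ++ Δ).map (fun r => (r, d + 1)) := by
      rw [h2]; simp
    have hstep : cbeBfs adjacency md exp (((res, d) :: fr.map (fun r => (r, d))) ++ nx.map (fun r => (r, d + 1))) =
        cbeBfs adjacency md ((cbeAdjGet adjacency res).foldl (cbeStepB d)
          (exp, fr.map (fun r => (r, d)) ++ nx.map (fun r => (r, d + 1)))).1
          ((cbeAdjGet adjacency res).foldl (cbeStepB d)
          (exp, fr.map (fun r => (r, d)) ++ nx.map (fun r => (r, d + 1)))).2 := by
      rw [List.cons_append, cbeBfs, if_pos hd]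
    obtain ⟨ih1, ih2⟩ := ih ((cbeAdjGet adjacency res).foldl (cbeStepB d)
      (exp, fr.map (fun r => (r, d)) ++ nx.map (fun r => (r, d + 1)))).1 (nx ++ Δ) h3
    have hfold : (res :: fr).foldl (fun st res => (cbeAdjGet adjacency res).foldl cbeStepA st) (exp, nx) =
        fr.foldl (fun st res => (cbeAdjGet adjacency res).foldl cbeStepA st)
          (((cbeAdjGet adjacency res).foldl (cbeStepB d)
            (exp, fr.map (fun r => (r, d)) ++ nx.map (fun r => (r, d + 1)))).1, nx ++ Δ) := by
      rw [List.foldl_cons, h1]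
    constructor
    · rw [List.map_cons, hstep, hq2, hfold]
      exact ih1
    · rw [hfold]
      exact ih2

theorem cbeBfs_deep (adjacency : List (String × Int × String × String × List (String × Int × String × String))) (md : Int) (d : Nat) (hd : ¬ ((d : Int) < md)) : ∀ (l : List (String × Int × String × String)) (exp : PySem.Set (String × Int × String × String)), cbeBfs adjacency md exp (l.map (fun r => (r, d))) = exp := by
  intro l
  induction l with
  | nil => intro exp; rw [List.map_nil, cbeBfs]
  | cons a l ih =>
    intro exp
    rw [List.map_cons, cbeBfs, if_neg hd]
    exact ih exp

theorem cbeMain (adjacency : List (String × Int × String × String × List (String × Int × String × String))) (md : Int) : ∀ (k d : Nat), d + k = md.toNat → ∀ (exp : PySem.Set (String × Int × String × String)) (fr : List (String × Int × String × String)), cbeLoopA adjacency k exp fr = cbeBfs adjacency md exp (fr.map (fun r => (r, d))) := by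
  intro k
  induction k with
  | zero =>
    intro d hk exp fr
    have hd : ¬ ((d : Int) < md) := by omega
    rw [cbeBfs_deep adjacency md d hd fr exp]
    rfl
  | succ k ih =>
    intro d hk exp fr
    have hd : (d : Int) < md := by omega
    obtain ⟨hlev, _⟩ := cbeLevel adjacency md d hd fr exp PySem.Set.empty (by intro x hx; cases hx)
    have hnil : fr.map (fun r => (r, d)) ++ (PySem.Set.empty : PySem.Set (String × Int × String × String)).map (fun r => (r, d + 1)) = fr.map (fun r => (r, d)) := by
      simp [PySem.Set.empty]
    rw [hnil] at hlev
    show (let st := cbeRound adjacency exp fr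
      if st.2 = [] then st.1 else cbeLoopA adjacency k st.1 st.2) = _
    simp only [cbeRound]
    rw [hlev]
    by_cases hempty : (fr.foldl (fun st res => (cbeAdjGet adjacency res).foldl cbeStepA st) (exp, PySem.Set.empty)).2 = []
    · rw [if_pos hempty, hempty, List.map_nil, cbeBfs]
    · rw [if_neg hempty]
      exact ih (d + 1) (by omega) _ _

-- ===== VERDICT (by name: the statement is the Claim_ definition above) =====
theorem contact_based_expansion_spec : Claim_equal_contact_based_expansion := by
  intro init adj md _
  unfold Spec_contact_based_expansion contact_based_expansion contact_based_expansion_alt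
  exact cbeMain adj md md.toNat 0 (by omega) _ _
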